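-- pv_equiv track=rewrite | github.com/myao9494/file_manager | backend/app/routers/terminal.py | _split_completion_token
-- ===== SOURCE A (Python) =====
-- def _split_completion_token(line: str) -> tuple[str, str, str]:
--     """補完対象のトークンを `先頭部分`, `トークン本体`, `引用符` に分解する"""
--     in_quote = False
--     quote_char = ""
--     token_start = 0
--
--     for index, char in enumerate(line):
--         if char in {'"', "'"}:
--             if in_quote and char == quote_char:
--                 in_quote = False
--                 quote_char = ""
--             elif not in_quote:
--                 in_quote = True
--                 quote_char = char
--         elif char.isspace() and not in_quote:
--             token_start = index + 1
--
--     prefix = line[:token_start]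
--     token = line[token_start:]
--     token_quote = token[0] if token.startswith(("\"", "'")) else ""
--     raw_token = token[1:] if token_quote else token
--     return prefix, raw_token, token_quote
-- ===== SOURCE B (Python) =====
-- def _split_completion_token(line: str) -> tuple[str, str, str]:
--     # pass 1: for each position, record whether it lies inside an open quote
--     mask = []
--     quote = None
--     for ch in line:
--         mask.append(quote is not None)
--         if ch in ('"', "'"):
--             if quote == ch:
--                 quote = None
--             elif quote is None:
--                 quote = ch
--     # pass 2: the last unquoted whitespace position decides the token start
--     token_start = 0
--     for i in range(len(line) - 1, -1, -1):
--         if not mask[i] and line[i].isspace():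
--             token_start = i + 1
--             break
--     prefix = line[:token_start]
--     token = line[token_start:]
--     token_quote = token[0] if token.startswith(("\"", "'")) else ""
--     raw_token = token[1:] if token_quote else token
--     return prefix, raw_token, token_quote
-- ===== Notes on version B (the rewrite author's own statement) =====
-- stated objective: alternative
-- what changed: A tracks token_start inside its single forward loop; B instead builds an in-quote mask in one forward pass and then scans backwards for the last unquoted whitespace (with break) to locate the token start, keeping A's final slicing.
import Mathlib
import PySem

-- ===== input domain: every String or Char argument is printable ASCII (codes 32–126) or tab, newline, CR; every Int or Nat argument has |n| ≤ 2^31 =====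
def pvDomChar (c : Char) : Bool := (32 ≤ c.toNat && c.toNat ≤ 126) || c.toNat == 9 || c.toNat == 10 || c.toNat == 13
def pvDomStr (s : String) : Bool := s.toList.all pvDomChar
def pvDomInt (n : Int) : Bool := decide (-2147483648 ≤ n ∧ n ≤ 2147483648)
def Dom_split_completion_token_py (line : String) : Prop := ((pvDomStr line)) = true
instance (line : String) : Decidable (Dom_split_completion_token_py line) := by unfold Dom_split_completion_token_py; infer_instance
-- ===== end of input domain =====

-- B replaces A's forward token_start bookkeeping by a quote mask plus a backward scan
-- for the last unquoted whitespace (objective: alternative decomposition, same cost).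


-- ===== PORT A =====
-- one iteration of A's for-loop over enumerate(line): state (in_quote, quote_char, token_start)
def pvStepA : (Bool × String × Int) → (Int × Char) → (Bool × String × Int)
  | (inq, qc, ts), (i, c) =>
    if c = '"' ∨ c = '\'' then
      if inq = true ∧ String.ofList [c] = qc then (false, "", ts)
      else if inq = false then (true, String.ofList [c], ts)
      else (inq, qc, ts)
    else if PySem.Chars.isspace c = true ∧ inq = false then (inq, qc, i + 1)
    else (inq, qc, ts)

-- A's final slicing: prefix = line[:ts], token = line[ts:], quote peeled off the token.
-- (token[0] is guarded by startswith, so it is ported as token.take 1.)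
def pvFinishA (cs : List Char) (ts : Int) : String × String × String :=
  let pre := PySem.List.slice cs none (some ts)
  let tok := PySem.List.slice cs (some ts) none
  let tq : String :=
    if PySem.Chars.startswith tok ['"'] || PySem.Chars.startswith tok ['\''] then
      String.ofList (tok.take 1) else ""
  let raw := if tq ≠ "" then PySem.List.slice tok (some 1) none else tok
  (String.ofList pre, String.ofList raw, tq)

def split_completion_token_py (line : String) : String × String × String :=
  pvFinishA line.toList
    (((PySem.List.enumerate line.toList 0).foldl pvStepA (false, "", 0)).2.2)

-- ===== PORT B =====
-- quote-state transition of B's first pass (quote : Option Char)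
def pvNext (c : Char) (q : Option Char) : Option Char :=
  if c = '"' ∨ c = '\'' then
    (if q = some c then none else if q = none then some c else q)
  else q

-- pass 1: mask[i] = "position i lies inside an open quote"
def pvMaskB : List Char → Option Char → List Bool
  | [], _ => []
  | c :: cs, q => q.isSome :: pvMaskB cs (pvNext c q)

-- pass 2: B's backward for-loop with break, over the reversed (index, char, masked) triples
def pvRevFind : List ((Int × Char) × Bool) → Int → Int
  | [], d => d
  | ((i, c), m) :: rest, d =>
    if (!m && PySem.Chars.isspace c) = true then i + 1 else pvRevFind rest d

-- B's final slicing (same code as in Source B, which reproduces A's tail verbatim)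
def pvFinishB (cs : List Char) (ts : Int) : String × String × String :=
  let pre := PySem.List.slice cs none (some ts)
  let tok := PySem.List.slice cs (some ts) none
  let tq : String :=
    if PySem.Chars.startswith tok ['"'] || PySem.Chars.startswith tok ['\''] then
      String.ofList (tok.take 1) else ""
  let raw := if tq ≠ "" then PySem.List.slice tok (some 1) none else tok
  (String.ofList pre, String.ofList raw, tq)

def split_completion_token_py_alt (line : String) : String × String × String :=
  pvFinishB line.toList
    (pvRevFind (((PySem.List.enumerate line.toList 0).zip (pvMaskB line.toList none)).reverse) 0)

-- ===== PRECONDITION & SPEC =====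
def Spec_split_completion_token_py (line : String) (out : String × String × String) : Prop := out = split_completion_token_py_alt line
instance (line : String) (out : String × String × String) : Decidable (Spec_split_completion_token_py line out) := by unfold Spec_split_completion_token_py; infer_instance

-- ===== CLAIM (what is proved, stated in full; the proofs are below) =====
def Claim_equal_split_completion_token_py : Prop := ∀ (line : String), Dom_split_completion_token_py line → Spec_split_completion_token_py line (split_completion_token_py line)

-- ===== LEMMAS AND PROOFS =====

-- A's (in_quote, quote_char) pair as a function of B's quote state
def pvInq (q : Option Char) : Bool := q.isSome
def pvQc : Option Char → String
  | some c => String.ofList [c]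
  | none => ""

lemma pvRevFind_append (l : List ((Int × Char) × Bool)) (i : Int) (c : Char) (m : Bool) (d : Int) :
    pvRevFind (l ++ [((i, c), m)]) d
      = pvRevFind l (if (!m && PySem.Chars.isspace c) = true then i + 1 else d) := by
  induction l with
  | nil => rfl
  | cons x l ih =>
    obtain ⟨⟨j, b⟩, n⟩ := x
    simp only [List.cons_append, pvRevFind, ih]

lemma pvSingleton_ne {c d : Char} (h : ¬ d = c) : ¬ String.ofList [c] = String.ofList [d] := by
  intro he
  have h2 := congrArg String.toList he
  simp at h2
  exact h h2.symm

lemma pvStepA_eq (q : Option Char) (i : Int) (c : Char) (ts : Int) :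
    pvStepA (pvInq q, pvQc q, ts) (i, c)
      = (pvInq (pvNext c q), pvQc (pvNext c q),
         if (!(pvInq q) && PySem.Chars.isspace c) = true then i + 1 else ts) := by
  by_cases hq : c = '"' ∨ c = '\''
  · have hs : PySem.Chars.isspace c = false := by
      rcases hq with h | h <;> subst h <;> decide
    cases q with
    | none => simp [pvStepA, pvNext, pvInq, pvQc, hq, hs]
    | some d =>
      by_cases hdc : d = c
      · subst hdc; simp [pvStepA, pvNext, pvInq, pvQc, hq, hs]
      · simp [pvStepA, pvNext, pvInq, pvQc, hq, hs, hdc, pvSingleton_ne hdc]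
  · cases q with
    | none =>
      simp only [pvStepA, pvNext, pvInq, pvQc, hq, if_false, Option.isSome_none]
      split <;> simp_all
    | some d =>
      simp only [pvStepA, pvNext, pvInq, pvQc, hq, if_false, Option.isSome_some]
      split <;> simp_all

lemma pvLoop_eq (cs : List Char) :
    ∀ (q : Option Char) (i ts : Int),
      ((PySem.List.enumerate cs i).foldl pvStepA (pvInq q, pvQc q, ts)).2.2
        = pvRevFind (((PySem.List.enumerate cs i).zip (pvMaskB cs q)).reverse) ts := by
  induction cs with
  | nil => intro q i ts; rfl
  | cons c cs ih =>
    intro q i ts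
    rw [PySem.List.enumerate_cons]
    show ((PySem.List.enumerate cs (i+1)).foldl pvStepA
        (pvStepA (pvInq q, pvQc q, ts) (i, c))).2.2 = _
    rw [pvStepA_eq, ih (pvNext c q) (i+1)]
    show _ = pvRevFind ((((i, c), pvInq q) ::
        ((PySem.List.enumerate cs (i+1)).zip (pvMaskB cs (pvNext c q)))).reverse) ts
    rw [List.reverse_cons, pvRevFind_append]

-- ===== VERDICT (by name: the statement is the Claim_ definition above) =====
theorem split_completion_token_py_spec : Claim_equal_split_completion_token_py := by
  intro line _
  show split_completion_token_py line = split_completion_token_py_alt line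
  unfold split_completion_token_py split_completion_token_py_alt
  have h := pvLoop_eq line.toList none 0 0
  simp only [pvInq, pvQc, Option.isSome_none] at h
  rw [h]
  rfl
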